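-- pv_equiv track=rewrite | github.com/jongheonleee/Backjun_Programmers | 프로그래머스/lv1/1845. 폰켓몬/폰켓몬.py | solution
-- ===== SOURCE A (Python) =====
-- def solution(nums):
--     # 당신은 최대한 다양한 종류의 폰켓몬을 가지길 원하기 때문에,
--     # 최대한 많은 종류의 폰켓몬을 포함해서 N/2마리를 선택하려 합니다.
--     from collections import Counter
--
--     p_cnt = Counter(nums)
--     seen = set()
--     m = len(nums) // 2
--     cnt = 0
--
--     for num in nums:
--         if p_cnt[num] >= 1 and num not in seen and m >= 1:
--             cnt += 1
--             m -= 1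
--             seen.add(num)
--
--     return cnt
-- ===== SOURCE B (Python) =====
-- def solution(nums):
--     return min(len(set(nums)), len(nums) // 2)
-- ===== Notes on version B (the rewrite author's own statement) =====
-- stated objective: simpler
-- what changed: Replaces the Counter, the seen-set loop with a decrementing capacity counter and an always-true count guard by the closed form min(len(set(nums)), len(nums)//2).
import Mathlib
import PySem

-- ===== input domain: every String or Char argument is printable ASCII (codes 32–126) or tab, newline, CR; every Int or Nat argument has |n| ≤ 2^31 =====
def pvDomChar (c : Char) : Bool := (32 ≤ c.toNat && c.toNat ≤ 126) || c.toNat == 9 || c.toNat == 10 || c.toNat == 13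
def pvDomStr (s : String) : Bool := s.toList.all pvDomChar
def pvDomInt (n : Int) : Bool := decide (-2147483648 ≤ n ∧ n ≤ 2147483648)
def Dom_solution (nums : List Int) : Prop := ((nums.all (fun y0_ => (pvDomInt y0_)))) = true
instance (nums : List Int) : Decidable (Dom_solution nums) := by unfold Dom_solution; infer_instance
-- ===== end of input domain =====

-- B replaces A's Counter + seen-set loop with decrementing capacity by the closed form
-- min(len(set(nums)), len(nums)//2) (objective: simpler).

-- ===== PORT A =====
def solution (nums : List Int) : Int :=
  let p_cnt := PySem.Dict.counter nums
  let seen : PySem.Set Int := PySem.Set.empty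
  let m : Int := PySem.Int.floordiv (nums.length : Int) 2
  let res := nums.foldl (fun (st : PySem.Set Int × Int × Int) num =>
      if p_cnt.getD num 0 ≥ 1 ∧ PySem.Set.contains st.1 num = false ∧ st.2.1 ≥ 1 then
        (PySem.Set.add st.1 num, st.2.1 - 1, st.2.2 + 1)
      else st) (seen, m, (0 : Int))
  res.2.2

-- ===== PORT B =====
def solution_alt (nums : List Int) : Int :=
  min ((PySem.Set.ofList nums).length : Int) (PySem.Int.floordiv (nums.length : Int) 2)

-- ===== PRECONDITION & SPEC =====
def Spec_solution (nums : List Int) (out : Int) : Prop := out = solution_alt nums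
instance (nums : List Int) (out : Int) : Decidable (Spec_solution nums out) := by unfold Spec_solution; infer_instance

-- ===== CLAIM (what is proved, stated in full; the proofs are below) =====
def Claim_equal_solution : Prop := ∀ (nums : List Int), Dom_solution nums → Spec_solution nums (solution nums)

-- ===== LEMMAS AND PROOFS =====

theorem pv_len_le_add (s : PySem.Set Int) (x : Int) :
    (s : List Int).length ≤ (PySem.Set.add s x).length := by
  unfold PySem.Set.add
  split <;> simp

theorem pv_len_le_update (l : List Int) (s : PySem.Set Int) :
    (s : List Int).length ≤ (PySem.Set.update s l).length := by
  induction l generalizing s with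
  | nil => simp [PySem.Set.update]
  | cons x t ih =>
      have h1 := pv_len_le_add s x
      have h2 := ih (PySem.Set.add s x)
      calc (s : List Int).length ≤ (PySem.Set.add s x).length := h1
        _ ≤ (PySem.Set.update (PySem.Set.add s x) t).length := h2
        _ = (PySem.Set.update s (x :: t)).length := by simp [PySem.Set.update]

theorem pv_len_add_of_not_mem (s : PySem.Set Int) (x : Int)
    (h : PySem.Set.contains s x = false) :
    ((PySem.Set.add s x) : List Int).length = s.length + 1 := by
  unfold PySem.Set.add
  simp [PySem.Set.contains] at h ⊢
  simp [h]

theorem pv_fold_inv (nums : List Int) (l : List Int) (hsub : ∀ x ∈ l, x ∈ nums)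
    (seen : PySem.Set Int) (m cnt : Int) (hm : 0 ≤ m) :
    (l.foldl (fun (st : PySem.Set Int × Int × Int) num =>
      if (PySem.Dict.counter nums).getD num 0 ≥ 1 ∧ PySem.Set.contains st.1 num = false ∧ st.2.1 ≥ 1 then
        (PySem.Set.add st.1 num, st.2.1 - 1, st.2.2 + 1)
      else st) (seen, m, cnt)).2.2
    = cnt + min (((PySem.Set.update seen l).length : Int) - (seen : List Int).length) m := by
  induction l generalizing seen m cnt with
  | nil =>
      simp [PySem.Set.update]
      omega
  | cons x t ih =>
      have hx : x ∈ nums := hsub x (List.mem_cons_self ..)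
      have hcnt : (PySem.Dict.counter nums).getD x 0 ≥ 1 := by
        rw [PySem.Dict.getD_counter]
        exact_mod_cast List.count_pos_iff.mpr hx
      have hsub' : ∀ y ∈ t, y ∈ nums := fun y hy => hsub y (List.mem_cons_of_mem _ hy)
      have hupd : PySem.Set.update seen (x :: t) = PySem.Set.update (PySem.Set.add seen x) t := by
        simp [PySem.Set.update]
      by_cases hc : PySem.Set.contains seen x = false
      · by_cases hm1 : m ≥ 1
        · -- taken: add x, decrement capacity
          have hstep := ih hsub' (PySem.Set.add seen x) (m - 1) (cnt + 1) (by omega)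
          have hlen := pv_len_add_of_not_mem seen x hc
          have hle := pv_len_le_update t (PySem.Set.add seen x)
          simp only [List.foldl_cons]
          rw [if_pos ⟨hcnt, hc, hm1⟩, hstep, hupd]
          omega
        · -- capacity exhausted: m = 0, state is frozen
          have hm0 : m = 0 := by omega
          subst hm0
          have hfrozen : ∀ (l' : List Int) (s : PySem.Set Int) (c : Int),
              (l'.foldl (fun (st : PySem.Set Int × Int × Int) num =>
                if (PySem.Dict.counter nums).getD num 0 ≥ 1 ∧ PySem.Set.contains st.1 num = false ∧ st.2.1 ≥ 1 then
                  (PySem.Set.add st.1 num, st.2.1 - 1, st.2.2 + 1)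
                else st) (s, (0 : Int), c)) = (s, 0, c) := by
            intro l'
            induction l' with
            | nil => intro s c; rfl
            | cons y t' ih' =>
                intro s c
                simp only [List.foldl_cons]
                rw [if_neg (by intro h; exact absurd h.2.2 (by norm_num))]
                exact ih' s c
          rw [hfrozen]
          have hle1 := pv_len_le_add seen x
          have hle2 := pv_len_le_update t (PySem.Set.add seen x)
          simp
          omega
      · -- already seen: state unchanged, add is a no-op
        simp only [Bool.not_eq_false] at hc
        have hadd : PySem.Set.add seen x = seen := by
          unfold PySem.Set.add
          rw [hc]
          simp
        have hstep := ih hsub' seen m cnt hm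
        simp only [List.foldl_cons]
        rw [if_neg (by intro h; rw [hc] at h; exact absurd h.2.1 (by simp)), hstep, hupd, hadd]

theorem solution_eq_alt (nums : List Int) : solution nums = solution_alt nums := by
  unfold solution solution_alt
  have hm : (0 : Int) ≤ PySem.Int.floordiv (nums.length : Int) 2 := by
    rw [PySem.Int.floordiv_eq_ediv_of_pos (by norm_num)]
    positivity
  have h := pv_fold_inv nums nums (fun x hx => hx) PySem.Set.empty
    (PySem.Int.floordiv (nums.length : Int) 2) 0 hm
  simp only [] at h ⊢
  rw [h]
  have : PySem.Set.update PySem.Set.empty nums = PySem.Set.ofList nums := by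
    simp [PySem.Set.update, PySem.Set.ofList_eq_foldl, PySem.Set.empty]
  rw [this]
  simp [PySem.Set.empty]

-- ===== VERDICT (by name: the statement is the Claim_ definition above) =====
theorem solution_spec : Claim_equal_solution := by
  intro nums _
  exact solution_eq_alt nums
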